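-- pv_equiv track=rewrite | github.com/IsaacChan228/COMP5511_group21 | minimax.py | vertical_weight
-- ===== SOURCE A (Python) =====
-- def add_arrays(arr1, arr2):
--     return [arr1[i] + arr2[i] for i in range(len(arr1))]
--
-- def vertical_weight(game_board, side):
--     rows = len(game_board)
--     cols = len(game_board[0])
--     total_array = [0, 0, 0, 0]
--
--     for col in range(cols):
--         # minus 3 to ensure the calculation is within the board limits
--         for row in range(rows - 3):
--             window = [game_board[row + i][col] for i in range(4)]
--             total_array = add_arrays(total_array, window_calculation(window, side))
--
--     return total_array
--
-- def window_calculation(window, side):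
--     opponent = 1 if side == 2 else 2
--
--     # Count player piece, opponent piece, and empty spaces in the window
--     player_pieces = window.count(side)
--     opponent_pieces = window.count(opponent)
--     empty_spaces = window.count(0)
--
--     # Initialize the array to store the number of match cases
--     # [4-piece, 3-piece, 2-piece, opponent 3-piece]
--     result = [0, 0, 0, 0]
--
--     # 4 piece in a row: Winning move
--     if player_pieces == 4:
--         result[0] += 1
--
--     # 3 piece in a row & 1 empty cell: 1 move away from winning
--     elif player_pieces == 3 and empty_spaces == 1:
--         result[1] += 1
--
--     # 2 piece in a row & 2 empty cell: 2 move away from winning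
--     elif player_pieces == 2 and empty_spaces == 2:
--         result[2] += 1
--
--     # 3 oppenent piece in a row & 1 empty cell: 1 move away from losing
--     elif opponent_pieces == 3 and empty_spaces == 1:
--         result[3] += 1
--
--     return result
-- ===== SOURCE B (Python) =====
-- def _bucket(p, o, e):
--     # classification index, same precedence as the original elif chain; -1 = no bucket
--     if p == 4:
--         return 0
--     if p == 3 and e == 1:
--         return 1
--     if p == 2 and e == 2:
--         return 2
--     if o == 3 and e == 1:
--         return 3
--     return -1
--
-- def vertical_weight(game_board, side):
--     rows = len(game_board)
--     cols = len(game_board[0])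
--     opponent = 1 if side == 2 else 2
--     total = [0, 0, 0, 0]
--     if rows >= 4:
--         for col in range(cols):
--             # seed running tallies over the first window of this column
--             p = o = e = 0
--             for i in range(4):
--                 v = game_board[i][col]
--                 if v == side:
--                     p += 1
--                 if v == opponent:
--                     o += 1
--                 if v == 0:
--                     e += 1
--             k = _bucket(p, o, e)
--             if k >= 0:
--                 total[k] += 1
--             # slide the window down, updating tallies incrementally
--             for row in range(1, rows - 3):
--                 u = game_board[row - 1][col]
--                 v = game_board[row + 3][col]
--                 if u == side:
--                     p -= 1
--                 if u == opponent:
--                     o -= 1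
--                 if u == 0:
--                     e -= 1
--                 if v == side:
--                     p += 1
--                 if v == opponent:
--                     o += 1
--                 if v == 0:
--                     e += 1
--                 k = _bucket(p, o, e)
--                 if k >= 0:
--                     total[k] += 1
--     return total
-- ===== Notes on version B (the rewrite author's own statement) =====
-- stated objective: faster
-- what changed: B replaces each window's list construction and three .count() scans by per-column running tallies (player/opponent/empty) seeded on the first four cells and updated incrementally while sliding down, bumping one bucket of the total per window; the rows>=4 guard skips columns with no windows.
import Mathlib
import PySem

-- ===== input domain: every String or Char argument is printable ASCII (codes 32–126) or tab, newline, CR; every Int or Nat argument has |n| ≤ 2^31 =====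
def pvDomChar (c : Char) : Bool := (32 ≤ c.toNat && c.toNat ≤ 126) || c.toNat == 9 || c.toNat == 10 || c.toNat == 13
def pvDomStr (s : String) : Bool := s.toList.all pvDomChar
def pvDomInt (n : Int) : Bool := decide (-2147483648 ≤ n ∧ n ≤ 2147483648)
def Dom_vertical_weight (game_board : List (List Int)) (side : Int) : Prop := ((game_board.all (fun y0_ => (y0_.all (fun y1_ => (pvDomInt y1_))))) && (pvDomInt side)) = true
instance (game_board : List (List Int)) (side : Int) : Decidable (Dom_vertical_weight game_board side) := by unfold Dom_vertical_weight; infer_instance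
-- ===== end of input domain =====

-- B replaces the per-window list build + three .count calls by running tallies slid down each
-- column (subtract the departing cell, add the entering cell), bumping one bucket per window
-- (objective: faster by a constant factor; same classification precedence).

-- board[r][c]; total with default 0 — in-range under Pre_ (out of range Python raises, excluded)
def pvCell (b : List (List Int)) (r c : Int) : Int :=
  PySem.List.pyGetD (PySem.List.pyGetD b r []) c 0

-- ===== PORT A =====
def add_arrays (arr1 arr2 : List Int) : List Int :=
  (PySem.List.pyRange 0 (PySem.List.len arr1) 1).map
    (fun i => PySem.List.pyGetD arr1 i 0 + PySem.List.pyGetD arr2 i 0)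

def window_calculation (window : List Int) (side : Int) : List Int :=
  let opponent : Int := if side = 2 then 1 else 2
  let player_pieces : Int := (PySem.List.count window side : Int)
  let opponent_pieces : Int := (PySem.List.count window opponent : Int)
  let empty_spaces : Int := (PySem.List.count window 0 : Int)
  -- result starts [0,0,0,0]; exactly one elif branch bumps one entry
  if player_pieces = 4 then [1, 0, 0, 0]
  else if player_pieces = 3 ∧ empty_spaces = 1 then [0, 1, 0, 0]
  else if player_pieces = 2 ∧ empty_spaces = 2 then [0, 0, 1, 0]
  else if opponent_pieces = 3 ∧ empty_spaces = 1 then [0, 0, 0, 1]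
  else [0, 0, 0, 0]

def vertical_weight (game_board : List (List Int)) (side : Int) : List Int :=
  let rows := PySem.List.len game_board
  let cols := PySem.List.len (PySem.List.pyGetD game_board 0 [])
  (PySem.List.pyRange 0 cols 1).foldl (fun total col =>
    (PySem.List.pyRange 0 (rows - 3) 1).foldl (fun total row =>
      add_arrays total (window_calculation
        ((PySem.List.pyRange 0 4 1).map (fun i => pvCell game_board (row + i) col)) side))
      total)
    [0, 0, 0, 0]

-- ===== PORT B =====
-- _bucket(p, o, e): classification index, -1 = no bucket
def pvBucket (p o e : Int) : Int :=
  if p = 4 then 0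
  else if p = 3 ∧ e = 1 then 1
  else if p = 2 ∧ e = 2 then 2
  else if o = 3 ∧ e = 1 then 3
  else -1

-- 'if k >= 0: total[k] += 1'
def pvBump (total : List Int) (k : Int) : List Int :=
  if 0 ≤ k then PySem.List.pySetD total k (PySem.List.pyGetD total k 0 + 1) else total

-- seed tallies over the first window of the column
def pvSeed (gb : List (List Int)) (col side opponent : Int) : Int × Int × Int :=
  (PySem.List.pyRange 0 4 1).foldl (fun s i =>
    let v := pvCell gb i col
    (if v = side then s.1 + 1 else s.1,
     if v = opponent then s.2.1 + 1 else s.2.1,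
     if v = 0 then s.2.2 + 1 else s.2.2)) (0, 0, 0)

-- one sliding step: drop cell row-1, add cell row+3, bump the new window's bucket
def pvSlide (gb : List (List Int)) (col side opponent : Int)
    (st : List Int × Int × Int × Int) (row : Int) : List Int × Int × Int × Int :=
  let u := pvCell gb (row - 1) col
  let v := pvCell gb (row + 3) col
  let p1 := if u = side then st.2.1 - 1 else st.2.1
  let o1 := if u = opponent then st.2.2.1 - 1 else st.2.2.1
  let e1 := if u = 0 then st.2.2.2 - 1 else st.2.2.2
  let p := if v = side then p1 + 1 else p1
  let o := if v = opponent then o1 + 1 else o1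
  let e := if v = 0 then e1 + 1 else e1
  (pvBump st.1 (pvBucket p o e), p, o, e)

def vertical_weight_alt (game_board : List (List Int)) (side : Int) : List Int :=
  let rows := PySem.List.len game_board
  let cols := PySem.List.len (PySem.List.pyGetD game_board 0 [])
  let opponent : Int := if side = 2 then 1 else 2
  if 4 ≤ rows then
    (PySem.List.pyRange 0 cols 1).foldl (fun total col =>
      let s := pvSeed game_board col side opponent
      let total1 := pvBump total (pvBucket s.1 s.2.1 s.2.2)
      ((PySem.List.pyRange 1 (rows - 3) 1).foldl (pvSlide game_board col side opponent)
        (total1, s)).1)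
      [0, 0, 0, 0]
  else [0, 0, 0, 0]

-- ===== PRECONDITION & SPEC =====
-- Pre_ excludes exactly the inputs where Python A raises IndexError: the empty board
-- (game_board[0]) and, when there is at least one window (rows ≥ 4), boards with a row
-- shorter than the first row (game_board[row+i][col] for col < cols).
def Pre_vertical_weight (game_board : List (List Int)) (side : Int) : Prop :=
  game_board ≠ [] ∧
    (4 ≤ game_board.length → ∀ r ∈ game_board, (game_board.headI).length ≤ r.length)
instance (game_board : List (List Int)) (side : Int) : Decidable (Pre_vertical_weight game_board side) := by unfold Pre_vertical_weight; infer_instance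

def pvWitness_vertical_weight : List (List Int) × Int := ([[1, 0], [2, 1], [1, 1], [0, 2]], 1)

def Spec_vertical_weight (game_board : List (List Int)) (side : Int) (out : List Int) : Prop := out = vertical_weight_alt game_board side
instance (game_board : List (List Int)) (side : Int) (out : List Int) : Decidable (Spec_vertical_weight game_board side out) := by unfold Spec_vertical_weight; infer_instance

-- ===== CLAIM (what is proved, stated in full; the proofs are below) =====
def Claim_equal_vertical_weight : Prop := ∀ (game_board : List (List Int)) (side : Int), Dom_vertical_weight game_board side → Pre_vertical_weight game_board side → Spec_vertical_weight game_board side (vertical_weight game_board side)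

-- ===== LEMMAS AND PROOFS =====

-- the count of x in the 4-window starting at row r of column col, as an Int
def pvCnt (gb : List (List Int)) (col x r : Int) : Int :=
  (PySem.List.count
    [pvCell gb r col, pvCell gb (r + 1) col, pvCell gb (r + 2) col, pvCell gb (r + 3) col] x : Int)

-- A's loop body, named
def pvStepA (gb : List (List Int)) (side col : Int) (total : List Int) (row : Int) : List Int :=
  add_arrays total (window_calculation
    ((PySem.List.pyRange 0 4 1).map (fun i => pvCell gb (row + i) col)) side)

lemma pvRange4 : PySem.List.pyRange 0 4 1 = [0, 1, 2, 3] := by decide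

lemma count4 (a b c d x : Int) :
    ((PySem.List.count [a, b, c, d] x : Nat) : Int) =
      (if a = x then 1 else 0) + (if b = x then 1 else 0) +
        (if c = x then 1 else 0) + (if d = x then 1 else 0) := by
  simp [PySem.List.count, List.count_cons]
  split_ifs <;> simp

lemma win_map (gb : List (List Int)) (col row : Int) :
    (PySem.List.pyRange 0 4 1).map (fun i => pvCell gb (row + i) col) =
      [pvCell gb row col, pvCell gb (row + 1) col,
       pvCell gb (row + 2) col, pvCell gb (row + 3) col] := by
  rw [pvRange4]; simp

lemma add4 (a b c d x y z w : Int) :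
    add_arrays [a, b, c, d] [x, y, z, w] = [a + x, b + y, c + z, d + w] := by
  have h : PySem.List.len ([a, b, c, d] : List Int) = 4 := by simp [PySem.List.len_eq]
  unfold add_arrays
  rw [h, pvRange4]
  simp [PySem.List.pyGetD, PySem.List.pyGet?, PySem.List.pyIdx?]

lemma bump0 (a b c d : Int) : pvBump [a, b, c, d] 0 = [a + 1, b, c, d] := rfl
lemma bump1 (a b c d : Int) : pvBump [a, b, c, d] 1 = [a, b + 1, c, d] := rfl
lemma bump2 (a b c d : Int) : pvBump [a, b, c, d] 2 = [a, b, c + 1, d] := rfl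
lemma bump3 (a b c d : Int) : pvBump [a, b, c, d] 3 = [a, b, c, d + 1] := rfl
lemma bumpNeg (t : List Int) : pvBump t (-1) = t := rfl

lemma pvBump_length (t : List Int) (k : Int) : (pvBump t k).length = t.length := by
  unfold pvBump; split
  · exact PySem.List.length_pySetD t k _
  · rfl

-- A's whole loop body equals B's bump of the bucketed window counts
lemma stepA_eq (gb : List (List Int)) (side col : Int) (a b c d row : Int) :
    pvStepA gb side col [a, b, c, d] row =
      pvBump [a, b, c, d]
        (pvBucket (pvCnt gb col side row) (pvCnt gb col (if side = 2 then 1 else 2) row)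
          (pvCnt gb col 0 row)) := by
  unfold pvStepA window_calculation pvBucket pvCnt
  rw [win_map]
  dsimp only
  split_ifs <;> simp [add4, bump0, bump1, bump2, bump3, bumpNeg]

lemma seed_eq (gb : List (List Int)) (col side opp : Int) :
    pvSeed gb col side opp =
      (pvCnt gb col side 0, pvCnt gb col opp 0, pvCnt gb col 0 0) := by
  unfold pvSeed pvCnt
  rw [pvRange4]
  simp only [List.foldl, count4, Prod.mk.injEq]
  norm_num
  refine ⟨?_, ?_, ?_⟩ <;> split_ifs <;> omega

lemma slide_step (gb : List (List Int)) (col side opp : Int) (tot : List Int) (r : Int) :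
    pvSlide gb col side opp (tot, pvCnt gb col side r, pvCnt gb col opp r, pvCnt gb col 0 r) (r + 1)
      = (pvBump tot (pvBucket (pvCnt gb col side (r + 1)) (pvCnt gb col opp (r + 1))
            (pvCnt gb col 0 (r + 1))),
         pvCnt gb col side (r + 1), pvCnt gb col opp (r + 1), pvCnt gb col 0 (r + 1)) := by
  have e1 : r + 1 - 1 = r := by ring
  have e2 : r + 1 + 3 = r + 4 := by ring
  have e3 : r + 1 + 1 = r + 2 := by ring
  have e4 : r + 1 + 2 = r + 3 := by ring
  have hp : ∀ x : Int,
      (if pvCell gb (r + 4) col = x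
        then (if pvCell gb r col = x then pvCnt gb col x r - 1 else pvCnt gb col x r) + 1
        else (if pvCell gb r col = x then pvCnt gb col x r - 1 else pvCnt gb col x r))
        = pvCnt gb col x (r + 1) := by
    intro x
    simp only [pvCnt, count4, e3, e4, e2]
    split_ifs <;> omega
  unfold pvSlide
  simp only [e1, e2]
  rw [hp side, hp opp, hp 0]

-- the inner sliding loop equals A's fold over the remaining windows
lemma inner_eq (gb : List (List Int)) (side col opp : Int)
    (hopp : opp = if side = 2 then 1 else 2) :
    ∀ (n : Nat) (r : Int) (tot : List Int), tot.length = 4 →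
      ((PySem.List.pyRange (r + 1) (r + 1 + n) 1).foldl (pvSlide gb col side opp)
        (tot, pvCnt gb col side r, pvCnt gb col opp r, pvCnt gb col 0 r)).1
      = (PySem.List.pyRange (r + 1) (r + 1 + n) 1).foldl (pvStepA gb side col) tot := by
  subst hopp
  intro n
  induction n with
  | zero =>
    intro r tot _
    rw [PySem.List.pyRange_one_eq_nil (by push_cast; omega)]
    rfl
  | succ n ih =>
    intro r tot hlen
    obtain ⟨a, b, c, d, rfl⟩ : ∃ a b c d, tot = [a, b, c, d] := by
      match tot, hlen with
      | [a, b, c, d], _ => exact ⟨a, b, c, d, rfl⟩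
    rw [PySem.List.pyRange_one_cons (by push_cast; omega)]
    simp only [List.foldl_cons]
    rw [slide_step, ← stepA_eq gb side col a b c d (r + 1)]
    push_cast
    have e : r + 1 + ((n : Int) + 1) = r + 1 + 1 + (n : Int) := by ring
    rw [e]
    exact ih (r + 1) _ (by rw [stepA_eq, pvBump_length]; rfl)

lemma stepA_length (gb : List (List Int)) (side col : Int) (tot : List Int) (row : Int)
    (h : tot.length = 4) : (pvStepA gb side col tot row).length = 4 := by
  obtain ⟨a, b, c, d, rfl⟩ : ∃ a b c d, tot = [a, b, c, d] := by
    match tot, h with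
    | [a, b, c, d], _ => exact ⟨a, b, c, d, rfl⟩
  rw [stepA_eq, pvBump_length]; rfl

lemma foldA_length (gb : List (List Int)) (side col : Int) :
    ∀ (L : List Int) (tot : List Int), tot.length = 4 →
      (L.foldl (pvStepA gb side col) tot).length = 4 := by
  intro L
  induction L with
  | nil => intro tot h; exact h
  | cons x L ih => intro tot h; exact ih _ (stepA_length gb side col tot x h)

-- one column of B equals one column of A
lemma col_eq (gb : List (List Int)) (side col : Int) (rows : Int) (h4 : 4 ≤ rows)
    (tot : List Int) (hlen : tot.length = 4) :
    ((PySem.List.pyRange 1 (rows - 3) 1).foldl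
        (pvSlide gb col side (if side = 2 then 1 else 2))
        (pvBump tot (pvBucket (pvSeed gb col side (if side = 2 then 1 else 2)).1
            (pvSeed gb col side (if side = 2 then 1 else 2)).2.1
            (pvSeed gb col side (if side = 2 then 1 else 2)).2.2),
          pvSeed gb col side (if side = 2 then 1 else 2))).1
      = (PySem.List.pyRange 0 (rows - 3) 1).foldl (pvStepA gb side col) tot := by
  obtain ⟨a, b, c, d, rfl⟩ : ∃ a b c d, tot = [a, b, c, d] := by
    match tot, hlen with
    | [a, b, c, d], _ => exact ⟨a, b, c, d, rfl⟩
  rw [seed_eq]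
  dsimp only
  rw [← stepA_eq gb side col a b c d 0]
  rw [PySem.List.pyRange_one_cons (show (0:Int) < rows - 3 by omega), List.foldl_cons]
  have h5 := inner_eq gb side col (if side = 2 then 1 else 2) rfl ((rows - 4).toNat) 0
    (pvStepA gb side col [a, b, c, d] 0) (by rw [stepA_eq, pvBump_length]; rfl)
  rw [zero_add, show (1:Int) + ((rows - 4).toNat : Int) = rows - 3 by
    rw [Int.toNat_of_nonneg (by omega)]; ring] at h5
  exact h5

-- both outer column folds agree, given the running total has 4 entries
lemma outer_eq (gb : List (List Int)) (side rows : Int) (h4 : 4 ≤ rows) :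
    ∀ (L : List Int) (tot : List Int), tot.length = 4 →
      L.foldl (fun total col =>
          ((PySem.List.pyRange 1 (rows - 3) 1).foldl
            (pvSlide gb col side (if side = 2 then 1 else 2))
            (pvBump total (pvBucket (pvSeed gb col side (if side = 2 then 1 else 2)).1
                (pvSeed gb col side (if side = 2 then 1 else 2)).2.1
                (pvSeed gb col side (if side = 2 then 1 else 2)).2.2),
              pvSeed gb col side (if side = 2 then 1 else 2))).1) tot
        = L.foldl (fun total col =>
            (PySem.List.pyRange 0 (rows - 3) 1).foldl (pvStepA gb side col) total) tot := by
  intro L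
  induction L with
  | nil => intro tot _; rfl
  | cons c L ih =>
    intro tot hlen
    simp only [List.foldl_cons]
    rw [col_eq gb side c rows h4 tot hlen]
    exact ih _ (foldA_length gb side c _ tot hlen)

theorem vertical_weight_spec : Claim_equal_vertical_weight := by
  unfold Claim_equal_vertical_weight Spec_vertical_weight
  intro gb side _ _
  unfold vertical_weight vertical_weight_alt
  dsimp only
  by_cases h4 : 4 ≤ PySem.List.len gb
  · rw [if_pos h4]
    have h4' : 4 ≤ ((gb.length : Int)) := by rwa [PySem.List.len_eq] at h4
    have := outer_eq gb side (PySem.List.len gb) h4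
      (PySem.List.pyRange 0 (PySem.List.len (PySem.List.pyGetD gb 0 [])) 1) [0, 0, 0, 0] rfl
    exact this.symm
  · rw [if_neg h4]
    have h3 : PySem.List.len gb - 3 ≤ 0 := by
      rw [PySem.List.len_eq] at h4 ⊢; omega
    simp only [PySem.List.pyRange_one_eq_nil h3, List.foldl_nil]
    exact PySem.List.foldl_ignore _ _
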